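-- pv_equiv track=rewrite | github.com/snehasarkarodn/tbdapi | open_ai_tbd_gen/pre_processing.py | image_path_structure_convert
-- ===== SOURCE A (Python) =====
-- def image_path_structure_convert(image_files):
--     image_path_dict = {}
--     # Iterate through the file paths
--     for path in image_files:
--         unique_subfolder = path.split('/')[0]
--         image_name = path.split('/')[1]
--         if unique_subfolder in image_path_dict:
--             image_path_dict[unique_subfolder].append(image_name)
--         else:
--             image_path_dict[unique_subfolder] = [image_name]
--     return(image_path_dict)
-- ===== SOURCE B (Python) =====
-- def image_path_structure_convert(image_files):
--     pairs = [(p.split('/')[0], p.split('/')[1]) for p in image_files]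
--     keys = dict.fromkeys(k for k, _ in pairs)
--     return {k: [n for k2, n in pairs if k2 == k] for k in keys}
-- ===== Notes on version B (the rewrite author's own statement) =====
-- stated objective: alternative
-- what changed: Replaces the incremental dict of growing lists (membership test + append/insert per path) with a two-phase grouping: extract all (subfolder, name) pairs once, take the first-occurrence-ordered key set via dict.fromkeys, then build each group with a filtering comprehension.
import Mathlib
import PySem

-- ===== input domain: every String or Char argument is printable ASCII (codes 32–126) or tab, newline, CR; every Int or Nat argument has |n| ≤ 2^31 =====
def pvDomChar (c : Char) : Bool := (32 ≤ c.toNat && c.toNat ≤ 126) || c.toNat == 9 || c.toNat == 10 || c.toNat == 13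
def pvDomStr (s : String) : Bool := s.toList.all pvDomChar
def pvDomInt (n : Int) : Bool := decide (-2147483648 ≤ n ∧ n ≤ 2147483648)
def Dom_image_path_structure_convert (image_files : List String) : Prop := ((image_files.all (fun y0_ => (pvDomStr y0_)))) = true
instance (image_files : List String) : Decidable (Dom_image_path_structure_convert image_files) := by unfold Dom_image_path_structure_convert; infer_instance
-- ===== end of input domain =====

-- B groups by building the (subfolder, name) pair list once, then a first-occurrence ordered
-- key list and one filtering pass per key, instead of A's incremental dict of growing lists
-- (alternative decomposition; not claimed faster).

-- ===== PORT A =====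
def image_path_structure_convert (image_files : List String) : List (String × List String) :=
  (image_files.foldl (fun image_path_dict path =>
      let unique_subfolder := (PySem.List.pyGet? ((PySem.Str.split? path "/").getD []) 0).getD ""
      let image_name := (PySem.List.pyGet? ((PySem.Str.split? path "/").getD []) 1).getD ""
      if image_path_dict.contains unique_subfolder then
        image_path_dict.modify unique_subfolder [] (fun l => l ++ [image_name])
      else
        image_path_dict.insert unique_subfolder [image_name])
    PySem.Dict.empty).items

-- ===== PORT B =====
def pvSplitPair (p : String) : String × String :=
  ((PySem.List.pyGet? ((PySem.Str.split? p "/").getD []) 0).getD "",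
   (PySem.List.pyGet? ((PySem.Str.split? p "/").getD []) 1).getD "")

def image_path_structure_convert_alt (image_files : List String) : List (String × List String) :=
  let pairs := image_files.map pvSplitPair
  let keys := PySem.List.dedup (pairs.map Prod.fst)
  keys.map (fun k => (k, (pairs.filter (fun q => q.1 == k)).map Prod.snd))

-- ===== PRECONDITION & SPEC =====
-- Pre_ excludes exactly the paths with no '/': there A raises IndexError on split('/')[1] (B raises too).
def Pre_image_path_structure_convert (image_files : List String) : Prop :=
  ∀ s ∈ image_files, '/' ∈ s.toList
instance (image_files : List String) : Decidable (Pre_image_path_structure_convert image_files) := by unfold Pre_image_path_structure_convert; infer_instance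
def pvWitness_image_path_structure_convert : List String := ["a/x", "b/y", "a/z"]

def Spec_image_path_structure_convert (image_files : List String) (out : List (String × List String)) : Prop := out = image_path_structure_convert_alt image_files
instance (image_files : List String) (out : List (String × List String)) : Decidable (Spec_image_path_structure_convert image_files out) := by unfold Spec_image_path_structure_convert; infer_instance

-- ===== CLAIM (what is proved, stated in full; the proofs are below) =====
def Claim_equal_image_path_structure_convert : Prop := ∀ (image_files : List String), Dom_image_path_structure_convert image_files → Pre_image_path_structure_convert image_files → Spec_image_path_structure_convert image_files (image_path_structure_convert image_files)

-- ===== LEMMAS AND PROOFS =====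

-- A's branch (append if present, insert singleton otherwise) is one Dict.modify step.
theorem pv_step_eq_modify (d : PySem.Dict String (List String)) (k : String) (n : String) :
    (if d.contains k then d.modify k [] (fun l => l ++ [n]) else d.insert k [n]) =
      d.modify k [] (fun l => l ++ [n]) := by
  by_cases h : d.contains k
  · simp [h]
  · have h0 : d.contains k = false := by simpa using h
    simp [h, PySem.Dict.modify, PySem.Dict.getD_of_not_contains d [] h0]

theorem pv_equiv (image_files : List String) :
    image_path_structure_convert image_files = image_path_structure_convert_alt image_files := by
  unfold image_path_structure_convert image_path_structure_convert_alt
  have h1 : (image_files.foldl (fun image_path_dict path =>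
      let unique_subfolder := (PySem.List.pyGet? ((PySem.Str.split? path "/").getD []) 0).getD ""
      let image_name := (PySem.List.pyGet? ((PySem.Str.split? path "/").getD []) 1).getD ""
      if image_path_dict.contains unique_subfolder then
        image_path_dict.modify unique_subfolder [] (fun l => l ++ [image_name])
      else
        image_path_dict.insert unique_subfolder [image_name])
    PySem.Dict.empty)
      = ((image_files.map pvSplitPair).foldl
          (fun d p => d.modify p.1 [] (fun l => l ++ [p.2])) PySem.Dict.empty) := by
    rw [List.foldl_map]
    congr 1
    funext d p
    simp only [pvSplitPair]
    exact pv_step_eq_modify d _ _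
  rw [h1]
  set ps := image_files.map pvSplitPair with hps
  rw [PySem.Dict.items_eq_map_keys _ (PySem.Dict.nodup_keys_foldl_modify_key ps Prod.fst []
        (fun _ p l => l ++ [p.2]) PySem.Dict.empty PySem.Dict.nodup_keys_empty) []]
  rw [PySem.Dict.keys_foldl_modify_key ps Prod.fst [] (fun _ p l => l ++ [p.2]) PySem.Dict.empty]
  simp only [PySem.Dict.keys_empty, PySem.Set.update_nil_left, PySem.List.dedup_eq_ofList,
    PySem.Dict.getD_foldl_modify_append, PySem.Dict.getD_empty, List.nil_append]

-- ===== VERDICT (by name: the statement is the Claim_ definition above) =====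
theorem image_path_structure_convert_spec : Claim_equal_image_path_structure_convert := by
  intro xs _ _
  exact pv_equiv xs
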